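-- pv_equiv track=rewrite | github.com/andyjliu/deal-or-no-deal | negotiation_agent.py | build_item_description
-- ===== SOURCE A (Python) =====
-- n2w = {1: 'one', 2: 'two', 3: 'three', 4: 'four', 5: 'five',
--        6: 'six', 7: 'seven', 8: 'eight', 9: 'nine', 0: 'zero'}
--
-- def build_item_description(items_dict):
--     # given a dictionary of items and their quantities, return a string describing this information.
--     s = ""
--     for idx, (item, num) in enumerate(items_dict.items()):
--         if num > 1 and idx == len(items_dict) - 1:
--             s += f"and {n2w[num]} {item}s"
--         elif num > 1:
--             s += f"{n2w[num]} {item}s, "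
--         elif idx == len(items_dict) - 1:
--             s += f"and {n2w[num]} {item}"
--         else:
--             s += f"{n2w[num]} {item}, "
--     return(s)
-- ===== SOURCE B (Python) =====
-- n2w = {1: 'one', 2: 'two', 3: 'three', 4: 'four', 5: 'five',
--        6: 'six', 7: 'seven', 8: 'eight', 9: 'nine', 0: 'zero'}
--
-- def build_item_description(items_dict):
--     # Build the per-item phrases in one loop, mark the last one afterwards, join with ", ".
--     parts = []
--     for item, num in items_dict.items():
--         word = n2w[num]
--         parts.append(f"{word} {item}s" if num > 1 else f"{word} {item}")
--     if parts:
--         parts[-1] = "and " + parts[-1]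
--     return ", ".join(parts)
-- ===== Notes on version B (the rewrite author's own statement) =====
-- stated objective: simpler
-- what changed: B builds a list of per-item phrases in one loop with no index/last-element logic inside it, prefixes 'and ' to the last phrase after the loop, and joins with ', ' instead of A's in-loop enumerate/len-1 separator decisions on a string accumulator.
import Mathlib
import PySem

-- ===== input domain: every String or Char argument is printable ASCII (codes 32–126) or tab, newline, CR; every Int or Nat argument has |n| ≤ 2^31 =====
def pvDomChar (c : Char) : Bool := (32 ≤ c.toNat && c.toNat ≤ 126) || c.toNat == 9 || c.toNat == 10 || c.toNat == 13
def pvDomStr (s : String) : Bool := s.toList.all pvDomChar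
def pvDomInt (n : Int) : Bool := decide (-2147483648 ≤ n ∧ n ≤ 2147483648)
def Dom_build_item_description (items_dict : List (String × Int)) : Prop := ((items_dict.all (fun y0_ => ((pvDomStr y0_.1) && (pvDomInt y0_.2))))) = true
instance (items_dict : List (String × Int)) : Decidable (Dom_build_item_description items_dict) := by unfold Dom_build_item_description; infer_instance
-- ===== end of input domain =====

-- B builds the list of per-item phrases in one loop, marks the last phrase with "and " afterwards
-- and joins with ", ", instead of A's in-loop enumerate/len-1 separator logic: simpler decomposition.


-- the module constant n2w
def pvN2w : PySem.Dict Int String :=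
  PySem.Dict.ofList [(1, "one"), (2, "two"), (3, "three"), (4, "four"), (5, "five"),
                     (6, "six"), (7, "seven"), (8, "eight"), (9, "nine"), (0, "zero")]

-- ===== PORT A =====
-- loop body of A; N = len(items_dict).  n2w[num] is ported as getD with default "":
-- Pre_ excludes exactly the inputs where the Python lookup raises KeyError.
def pyStepA (N : Int) (s : String) (p : Int × (String × Int)) : String :=
  let idx := p.1
  let item := p.2.1
  let num := p.2.2
  let w := PySem.Dict.getD pvN2w num ""
  if num > 1 ∧ idx = N - 1 then s ++ ("and " ++ w ++ " " ++ item ++ "s")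
  else if num > 1 then s ++ (w ++ " " ++ item ++ "s, ")
  else if idx = N - 1 then s ++ ("and " ++ w ++ " " ++ item)
  else s ++ (w ++ " " ++ item ++ ", ")

def build_item_description (items_dict : List (String × Int)) : String :=
  (PySem.List.enumerate items_dict 0).foldl (pyStepA (items_dict.length : Int)) ""

-- ===== PORT B =====
-- phrase for one item (the conditional expression inside B's append)
def pyPhrase (item : String) (num : Int) : String :=
  let word := PySem.Dict.getD pvN2w num ""
  if num > 1 then word ++ " " ++ item ++ "s" else word ++ " " ++ item

-- "if parts: parts[-1] = 'and ' + parts[-1]"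
def pyMarkLast (parts : List String) : List String :=
  match parts.reverse with
  | [] => []
  | last :: rest => (("and " ++ last) :: rest).reverse

def build_item_description_alt (items_dict : List (String × Int)) : String :=
  PySem.Str.join ", " (pyMarkLast (items_dict.foldl (fun ps x => ps ++ [pyPhrase x.1 x.2]) []))

-- ===== PRECONDITION & SPEC =====
-- Pre_ excludes quantities outside 0..9, on which Python A raises KeyError in n2w[num], and
-- association lists with duplicate keys, which do not represent a Python dict (the dict
-- collapses duplicates before A ever runs).
def Pre_build_item_description (items_dict : List (String × Int)) : Prop :=
  items_dict.Pairwise (fun p q => p.1 ≠ q.1) ∧ ∀ p ∈ items_dict, 0 ≤ p.2 ∧ p.2 ≤ 9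

instance (items_dict : List (String × Int)) : Decidable (Pre_build_item_description items_dict) := by
  unfold Pre_build_item_description; infer_instance

def pvWitness_build_item_description : (List (String × Int)) := [("book", 2), ("hat", 1)]

def Spec_build_item_description (items_dict : List (String × Int)) (out : String) : Prop := out = build_item_description_alt items_dict
instance (items_dict : List (String × Int)) (out : String) : Decidable (Spec_build_item_description items_dict out) := by unfold Spec_build_item_description; infer_instance

-- ===== CLAIM (what is proved, stated in full; the proofs are below) =====
def Claim_equal_build_item_description : Prop := ∀ (items_dict : List (String × Int)), Dom_build_item_description items_dict → Pre_build_item_description items_dict → Spec_build_item_description items_dict (build_item_description items_dict)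

-- ===== LEMMAS AND PROOFS =====

-- the comma-before-and description of a list of phrases (proof-side characterisation)
def pvDesc : List String → String
  | [] => ""
  | [x] => "and " ++ x
  | x :: y :: t => x ++ ", " ++ pvDesc (y :: t)

-- proof-side recursive form of pyMarkLast
def pvMk : List String → List String
  | [] => []
  | [x] => ["and " ++ x]
  | x :: y :: t => x :: pvMk (y :: t)

theorem pyMarkLast_cons (x : String) (l : List String) (h : l ≠ []) :
    pyMarkLast (x :: l) = x :: pyMarkLast l := by
  cases hl : l.reverse with
  | nil => exact absurd (List.reverse_eq_nil_iff.mp hl) h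
  | cons a t =>
    simp [pyMarkLast, hl, List.reverse_cons]

theorem pyMarkLast_eq_pvMk : ∀ ps : List String, pyMarkLast ps = pvMk ps
  | [] => rfl
  | [x] => rfl
  | x :: y :: t => by
    rw [pyMarkLast_cons x (y :: t) (by simp), pyMarkLast_eq_pvMk (y :: t)]
    rfl

theorem join_pvMk : ∀ ps : List String, PySem.Str.join ", " (pvMk ps) = pvDesc ps
  | [] => by simp [pvMk, pvDesc, PySem.Str.join]
  | [x] => by
    simp only [pvMk, pvDesc]
    apply String.toList_inj.mp
    simp [PySem.Str.join, String.toList_append]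
  | x :: y :: t => by
    have hmk : pvMk (x :: y :: t) = x :: pvMk (y :: t) := rfl
    have hne : ∃ a s, pvMk (y :: t) = a :: s := by
      cases t with
      | nil => exact ⟨"and " ++ y, [], rfl⟩
      | cons z t' => exact ⟨y, pvMk (z :: t'), rfl⟩
    obtain ⟨a, s, hs⟩ := hne
    rw [hmk, hs]
    have hjoin : PySem.Str.join ", " (x :: a :: s) = x ++ ", " ++ PySem.Str.join ", " (a :: s) := by
      simp [PySem.Str.join, PySem.Chars.join_cons_cons]
      apply String.toList_inj.mp
      simp [String.toList_append]
    rw [hjoin, ← hs, join_pvMk (y :: t)]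
    rfl

theorem A_loop (N : Int) :
    ∀ (l : List (String × Int)) (i : Int) (s : String),
      i + (l.length : Int) = N →
      (PySem.List.enumerate l i).foldl (pyStepA N) s
        = s ++ pvDesc (l.map (fun x => pyPhrase x.1 x.2))
  | [], i, s, _ => by
    simp [PySem.List.enumerate_nil, pvDesc, String.append_empty]
  | [x], i, s, h => by
    have hi : i = N - 1 := by simp at h; omega
    simp only [PySem.List.enumerate_cons, PySem.List.enumerate_nil, List.foldl_cons,
      List.foldl_nil, List.map_cons, List.map_nil]
    show pyStepA N s (i, x) = s ++ pvDesc [pyPhrase x.1 x.2]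
    simp only [pyStepA, pyPhrase, pvDesc, hi]
    by_cases hn : x.2 > 1 <;> simp [hn, String.append_assoc]
  | x :: y :: t, i, s, h => by
    have hi : ¬ (i = N - 1) := by simp at h; omega
    rw [PySem.List.enumerate_cons, List.foldl_cons,
      A_loop N (y :: t) (i + 1) (pyStepA N s (i, x)) (by simp at h ⊢; omega)]
    show pyStepA N s (i, x) ++ _ = s ++ pvDesc (pyPhrase x.1 x.2 :: (y :: t).map _)
    have hdesc : pvDesc (pyPhrase x.1 x.2 :: (y :: t).map (fun x => pyPhrase x.1 x.2))
        = pyPhrase x.1 x.2 ++ ", " ++ pvDesc ((y :: t).map (fun x => pyPhrase x.1 x.2)) := by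
      simp [pvDesc]
    rw [hdesc]
    simp only [pyStepA, pyPhrase, hi]
    by_cases hn : x.2 > 1 <;> simp [hn, String.append_assoc]

theorem parts_eq_map (items_dict : List (String × Int)) :
    items_dict.foldl (fun ps x => ps ++ [pyPhrase x.1 x.2]) []
      = items_dict.map (fun x => pyPhrase x.1 x.2) := by
  simpa using PySem.List.foldl_append_singleton_eq_map (fun x : String × Int => pyPhrase x.1 x.2) items_dict []

-- ===== VERDICT (by name: the statement is the Claim_ definition above) =====
theorem build_item_description_spec : Claim_equal_build_item_description := by
  intro items_dict _ _
  unfold Spec_build_item_description build_item_description build_item_description_alt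
  rw [parts_eq_map, pyMarkLast_eq_pvMk, join_pvMk,
    A_loop (items_dict.length : Int) items_dict 0 "" (by simp), String.empty_append]
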